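-- pv_equiv track=rewrite | github.com/Rubiga27/Closest_Min_Max | closest_minmax.py | smallest_subarray_size
-- ===== SOURCE A (Python) =====
-- def smallest_subarray_size(A):
--     max_val = A[0]
--     min_val = A[0]
--     min_max_indices = []
--
--     for i in range(len(A)):
--         if A[i] > max_val:
--             max_val = A[i]
--         if A[i] < min_val:
--             min_val = A[i]
--
--     for i in range(len(A)):
--         if A[i] == max_val or A[i] == min_val:
--             min_max_indices.append(i)
--
--     return min_max_indices[-1] - min_max_indices[0] + 1
-- ===== SOURCE B (Python) =====
-- def smallest_subarray_size(A):
--     mn = mx = A[0]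
--     f_mn = l_mn = f_mx = l_mx = 0
--     for i, v in enumerate(A):
--         if v < mn:
--             mn = v
--             f_mn = l_mn = i
--         elif v == mn:
--             l_mn = i
--         if v > mx:
--             mx = v
--             f_mx = l_mx = i
--         elif v == mx:
--             l_mx = i
--     return max(l_mn, l_mx) - min(f_mn, f_mx) + 1
-- ===== Notes on version B (the rewrite author's own statement) =====
-- stated objective: alternative
-- what changed: B replaces A's staged passes (first find min/max, then collect the full list of matching indices and subtract its ends) by a single pass with an online accumulator that tracks min, max and the first/last index of each, resetting the index pair whenever a new extremum appears; no index list is ever built. Pre_ excludes only the empty list, where A raises IndexError.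
import Mathlib
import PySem

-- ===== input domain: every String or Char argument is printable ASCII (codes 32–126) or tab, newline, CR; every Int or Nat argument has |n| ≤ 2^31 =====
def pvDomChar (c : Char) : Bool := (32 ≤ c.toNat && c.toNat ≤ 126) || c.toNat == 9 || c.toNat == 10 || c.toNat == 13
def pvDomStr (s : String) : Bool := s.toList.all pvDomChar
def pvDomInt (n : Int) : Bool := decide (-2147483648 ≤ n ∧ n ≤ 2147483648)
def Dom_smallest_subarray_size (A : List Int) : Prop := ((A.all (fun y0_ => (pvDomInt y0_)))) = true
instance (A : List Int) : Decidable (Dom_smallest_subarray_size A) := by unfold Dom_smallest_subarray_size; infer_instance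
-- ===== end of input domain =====

-- B replaces A's staged passes (compute min/max, then collect all matching indices into a list) by a
-- single pass tracking min/max and their first/last indices online; equal on all nonempty lists.


-- ===== PORT A =====
def smallest_subarray_size (A : List Int) : Int :=
  let a0 := PySem.List.pyGetD A 0 0
  let mm :=
    (PySem.List.pyRange 0 (PySem.List.len A) 1).foldl
      (fun s i =>
        let s1 := if PySem.List.pyGetD A i 0 > s.1 then (PySem.List.pyGetD A i 0, s.2) else s
        if PySem.List.pyGetD A i 0 < s1.2 then (s1.1, PySem.List.pyGetD A i 0) else s1)
      (a0, a0)
  let idxs :=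
    (PySem.List.pyRange 0 (PySem.List.len A) 1).foldl
      (fun acc i =>
        if PySem.List.pyGetD A i 0 = mm.1 ∨ PySem.List.pyGetD A i 0 = mm.2
        then acc ++ [i] else acc)
      []
  PySem.List.pyGetD idxs (-1) 0 - PySem.List.pyGetD idxs 0 0 + 1

-- ===== PORT B =====
-- state for the min-tracking triple (mn, f_mn, l_mn): Python's first if/elif chain
def pvMinStep (s : Int × Int × Int) (iv : Int × Int) : Int × Int × Int :=
  if iv.2 < s.1 then (iv.2, iv.1, iv.1)
  else if iv.2 = s.1 then (s.1, s.2.1, iv.1)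
  else s

-- state for the max-tracking triple (mx, f_mx, l_mx): Python's second if/elif chain
def pvMaxStep (s : Int × Int × Int) (iv : Int × Int) : Int × Int × Int :=
  if iv.2 > s.1 then (iv.2, iv.1, iv.1)
  else if iv.2 = s.1 then (s.1, s.2.1, iv.1)
  else s

def smallest_subarray_size_alt (A : List Int) : Int :=
  let a0 := PySem.List.pyGetD A 0 0
  let s :=
    (PySem.List.enumerate A 0).foldl
      (fun s iv => (pvMinStep s.1 iv, pvMaxStep s.2 iv))
      ((a0, 0, 0), (a0, 0, 0))
  max s.1.2.2 s.2.2.2 - min s.1.2.1 s.2.2.1 + 1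

-- ===== PRECONDITION & SPEC =====
-- Pre_ excludes only the empty list, on which A raises IndexError (A[0]).
def Pre_smallest_subarray_size (A : List Int) : Prop := A ≠ []
instance (A : List Int) : Decidable (Pre_smallest_subarray_size A) := by unfold Pre_smallest_subarray_size; infer_instance
def pvWitness_smallest_subarray_size : List Int := [3, 1, 2]
def Spec_smallest_subarray_size (A : List Int) (out : Int) : Prop := out = smallest_subarray_size_alt A
instance (A : List Int) (out : Int) : Decidable (Spec_smallest_subarray_size A out) := by unfold Spec_smallest_subarray_size; infer_instance

-- ===== CLAIM (what is proved, stated in full; the proofs are below) =====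
def Claim_equal_smallest_subarray_size : Prop := ∀ (A : List Int), Dom_smallest_subarray_size A → Pre_smallest_subarray_size A → Spec_smallest_subarray_size A (smallest_subarray_size A)

-- ===== LEMMAS AND PROOFS =====

theorem pv_filter_range_eq_findIdxs (l : List Int) (d : Int) (p : Int → Bool) :
    (List.range l.length).filter (fun k => p (l.getD k d)) = l.findIdxs p := by
  induction l with
  | nil => simp
  | cons x xs ih =>
    rw [List.length_cons, List.range_succ_eq_map, List.filter_cons, List.filter_map,
      List.findIdxs_cons, List.findIdxs_start]
    simp only [Function.comp_def, List.getD_cons_succ, List.getD_cons_zero, ih]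

theorem pv_head_findIdxs (l : List Int) (p : Int → Bool) :
    (l.findIdxs p).head? = l.findIdx? p := by
  induction l with
  | nil => simp
  | cons x xs ih =>
    rw [List.findIdxs_cons, List.findIdx?_cons, List.findIdxs_start]
    cases p x <;> simp [ih]

theorem pv_findIdx?_or (l : List Int) (v w : Int) (i j : Nat)
    (hi : l.findIdx? (fun x => x == v) = some i) (hj : l.findIdx? (fun x => x == w) = some j) :
    l.findIdx? (fun x => x == v || x == w) = some (min i j) := by
  induction l generalizing i j with
  | nil => simp at hi
  | cons x xs ih =>
    rw [List.findIdx?_cons] at hi hj ⊢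
    by_cases hv : x = v
    · simp [hv] at hi ⊢
      omega
    · by_cases hw : x = w
      · simp [hw] at hj ⊢
        subst hj
        simp
      · simp [hv, hw] at hi hj ⊢
        obtain ⟨i', hi', rfl⟩ := hi
        obtain ⟨j', hj', rfl⟩ := hj
        exact ⟨min i' j', ih _ _ hi' hj', by omega⟩

theorem pv_findIdxs_reverse (l : List Int) (p : Int → Bool) :
    l.reverse.findIdxs p = ((l.findIdxs p).reverse).map (fun i => l.length - 1 - i) := by
  induction l with
  | nil => simp
  | cons x xs ih =>
    have hs : xs.findIdxs p 1 = (xs.findIdxs p).map (· + 1) := List.findIdxs_start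
    rw [List.reverse_cons, List.findIdxs_append, ih,
        show (x :: xs).findIdxs p = (if p x then 0 :: xs.findIdxs p 1 else xs.findIdxs p 1) from
          List.findIdxs_cons, hs]
    cases hx : p x
    · simp [hx]
      intro a ha hp; omega
    · simp [hx, List.reverse_cons, List.map_append]
      intro a ha hp; omega

theorem pv_index?_findIdx? (l : List Int) (v : Int) :
    PySem.List.index? l v = l.findIdx? (fun x => x == v) := by
  rw [PySem.List.index?_eq_idxOf?]
  simp [List.idxOf?]

-- characterization of B's min-tracking fold: min of the list, first and last index of the min
theorem pv_minfold_char (a : Int) (t : List Int) :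
    (PySem.List.enumerate (a :: t) 0).foldl pvMinStep (a, 0, 0) =
      (t.foldl min a,
       (((PySem.List.index? (a :: t) (t.foldl min a)).getD 0 : Nat) : Int),
       ((a :: t).length : Int) - 1 -
         (((PySem.List.index? ((a :: t).reverse) (t.foldl min a)).getD 0 : Nat) : Int)) := by
  induction t using List.reverseRecOn with
  | nil =>
      rw [List.foldl_nil, show ([a] : List Int).reverse = [a] from rfl,
        PySem.List.index?_cons_self]
      simp [PySem.List.enumerate_cons, PySem.List.enumerate_nil, pvMinStep]
  | append_singleton t' x ih =>
      have hle : ∀ y ∈ a :: t', t'.foldl min a ≤ y :=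
        PySem.List.min?_isMin (PySem.List.min?_id_cons a t')
      have hm : t'.foldl min a ∈ a :: t' := by
        rcases PySem.List.foldl_min_mem t' a with h | h
        · rw [h]; exact List.mem_cons_self
        · exact List.mem_cons_of_mem _ h
      have hrev : ((a :: t') ++ [x]).reverse = x :: (a :: t').reverse := by simp
      rw [← List.cons_append, PySem.List.enumerate_append, List.foldl_append, ih]
      simp only [PySem.List.enumerate_cons, PySem.List.enumerate_nil, List.foldl_cons,
        List.foldl_nil, List.foldl_append]
      rcases lt_trichotomy x (t'.foldl min a) with hlt | heq | hgt
      · -- new strict minimum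
        have hnot : x ∉ a :: t' := fun hx => absurd (hle x hx) (by omega)
        have h1 : PySem.List.index? ((a :: t') ++ [x]) x = some (a :: t').length :=
          PySem.List.index?_append_singleton_self _ _ hnot
        have h2 : PySem.List.index? (((a :: t') ++ [x]).reverse) x = some 0 := by
          rw [hrev]; exact PySem.List.index?_cons_self _ _
        rw [min_eq_right hlt.le, h1, h2]
        simp [pvMinStep, hlt]
      · -- equal to the minimum: only the last index moves
        rw [← heq] at hle hm ⊢
        have h2 : PySem.List.index? (((a :: t') ++ [x]).reverse) x = some 0 := by
          rw [hrev]; exact PySem.List.index?_cons_self _ _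
        rw [min_self, PySem.List.index?_append_of_mem _ hm, h2]
        simp [pvMinStep]
      · -- larger: state unchanged
        have hne : x ≠ t'.foldl min a := by omega
        obtain ⟨r, hr⟩ := Option.isSome_iff_exists.mp
          ((PySem.List.index?_isSome_iff (a :: t').reverse _).mpr (List.mem_reverse.mpr hm))
        obtain ⟨hrlt, -, -⟩ := PySem.List.getElem_of_index?_eq_some hr
        rw [List.length_reverse] at hrlt
        have h2 : PySem.List.index? (((a :: t') ++ [x]).reverse) (t'.foldl min a)
            = some (r + 1) := by
          rw [hrev, PySem.List.index?_cons_of_ne _ hne, hr]; rfl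
        rw [min_eq_left hgt.le, PySem.List.index?_append_of_mem _ hm, h2, hr]
        simp [pvMinStep, hne, not_lt_of_gt hgt]

theorem pv_maxfold_char (a : Int) (t : List Int) :
    (PySem.List.enumerate (a :: t) 0).foldl pvMaxStep (a, 0, 0) =
      (t.foldl max a,
       (((PySem.List.index? (a :: t) (t.foldl max a)).getD 0 : Nat) : Int),
       ((a :: t).length : Int) - 1 -
         (((PySem.List.index? ((a :: t).reverse) (t.foldl max a)).getD 0 : Nat) : Int)) := by
  induction t using List.reverseRecOn with
  | nil =>
      rw [List.foldl_nil, show ([a] : List Int).reverse = [a] from rfl,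
        PySem.List.index?_cons_self]
      simp [PySem.List.enumerate_cons, PySem.List.enumerate_nil, pvMaxStep]
  | append_singleton t' x ih =>
      have hle : ∀ y ∈ a :: t', y ≤ t'.foldl max a :=
        PySem.List.max?_isMax (PySem.List.max?_id_cons a t')
      have hm : t'.foldl max a ∈ a :: t' := by
        rcases PySem.List.foldl_max_mem t' a with h | h
        · rw [h]; exact List.mem_cons_self
        · exact List.mem_cons_of_mem _ h
      have hrev : ((a :: t') ++ [x]).reverse = x :: (a :: t').reverse := by simp
      rw [← List.cons_append, PySem.List.enumerate_append, List.foldl_append, ih]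
      simp only [PySem.List.enumerate_cons, PySem.List.enumerate_nil, List.foldl_cons,
        List.foldl_nil, List.foldl_append]
      rcases lt_trichotomy (t'.foldl max a) x with hlt | heq | hgt
      · -- new strict minimum
        have hnot : x ∉ a :: t' := fun hx => absurd (hle x hx) (by omega)
        have h1 : PySem.List.index? ((a :: t') ++ [x]) x = some (a :: t').length :=
          PySem.List.index?_append_singleton_self _ _ hnot
        have h2 : PySem.List.index? (((a :: t') ++ [x]).reverse) x = some 0 := by
          rw [hrev]; exact PySem.List.index?_cons_self _ _
        rw [max_eq_right hlt.le, h1, h2]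
        simp [pvMaxStep, hlt]
      · -- equal to the minimum: only the last index moves
        rw [heq] at hle hm ⊢
        have h2 : PySem.List.index? (((a :: t') ++ [x]).reverse) x = some 0 := by
          rw [hrev]; exact PySem.List.index?_cons_self _ _
        rw [max_self, PySem.List.index?_append_of_mem _ hm, h2]
        simp [pvMaxStep]
      · -- larger: state unchanged
        have hne : x ≠ t'.foldl max a := by omega
        obtain ⟨r, hr⟩ := Option.isSome_iff_exists.mp
          ((PySem.List.index?_isSome_iff (a :: t').reverse _).mpr (List.mem_reverse.mpr hm))
        obtain ⟨hrlt, -, -⟩ := PySem.List.getElem_of_index?_eq_some hr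
        rw [List.length_reverse] at hrlt
        have h2 : PySem.List.index? (((a :: t') ++ [x]).reverse) (t'.foldl max a)
            = some (r + 1) := by
          rw [hrev, PySem.List.index?_cons_of_ne _ hne, hr]; rfl
        rw [max_eq_left hgt.le, PySem.List.index?_append_of_mem _ hm, h2, hr]
        simp [pvMaxStep, hne, not_lt_of_gt hgt]

theorem pv_main (a : Int) (t : List Int) :
    smallest_subarray_size (a :: t) = smallest_subarray_size_alt (a :: t) := by
  set mx := t.foldl max a with hmx
  set mn := t.foldl min a with hmn
  have hmemx : mx ∈ a :: t := by
    rcases PySem.List.foldl_max_mem t a with h | h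
    · rw [hmx, h]; exact List.mem_cons_self
    · exact List.mem_cons_of_mem _ h
  have hmemn : mn ∈ a :: t := by
    rcases PySem.List.foldl_min_mem t a with h | h
    · rw [hmn, h]; exact List.mem_cons_self
    · exact List.mem_cons_of_mem _ h
  obtain ⟨i1, hi1⟩ := Option.isSome_iff_exists.mp ((PySem.List.index?_isSome_iff (a :: t) mn).mpr hmemn)
  obtain ⟨i2, hi2⟩ := Option.isSome_iff_exists.mp ((PySem.List.index?_isSome_iff (a :: t) mx).mpr hmemx)
  obtain ⟨r1, hr1⟩ := Option.isSome_iff_exists.mp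
    ((PySem.List.index?_isSome_iff (a :: t).reverse mn).mpr (List.mem_reverse.mpr hmemn))
  obtain ⟨r2, hr2⟩ := Option.isSome_iff_exists.mp
    ((PySem.List.index?_isSome_iff (a :: t).reverse mx).mpr (List.mem_reverse.mpr hmemx))
  obtain ⟨hr1lt, -, -⟩ := PySem.List.getElem_of_index?_eq_some hr1
  obtain ⟨hr2lt, -, -⟩ := PySem.List.getElem_of_index?_eq_some hr2
  rw [List.length_reverse] at hr1lt hr2lt
  set p : Int → Bool := fun y => decide (y = mx ∨ y = mn) with hp
  have hpq : p = fun y => y == mx || y == mn := by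
    funext y
    by_cases h1 : y = mx <;> by_cases h2 : y = mn <;> simp [hp, h1, h2]
  have hhead : (List.findIdxs p (a :: t)).head? = some (min i2 i1) := by
    rw [pv_head_findIdxs, hpq]
    exact pv_findIdx?_or (a :: t) mx mn i2 i1
      ((pv_index?_findIdx? (a :: t) mx) ▸ hi2) ((pv_index?_findIdx? (a :: t) mn) ▸ hi1)
  have hrevhead : (List.findIdxs p (a :: t).reverse).head? = some (min r2 r1) := by
    rw [pv_head_findIdxs, hpq]
    exact pv_findIdx?_or (a :: t).reverse mx mn r2 r1
      ((pv_index?_findIdx? (a :: t).reverse mx) ▸ hr2) ((pv_index?_findIdx? (a :: t).reverse mn) ▸ hr1)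
  have hKne : List.findIdxs p (a :: t) ≠ [] := by
    intro h; rw [h] at hhead; simp at hhead
  obtain ⟨g, hg⟩ := Option.isSome_iff_exists.mp (List.getLast?_isSome.mpr hKne)
  have hglt : g < (a :: t).length := by
    have hm : g ∈ List.findIdxs p (a :: t) := List.mem_of_getLast? hg
    have := List.lt_add_of_mem_findIdxs g hm
    omega
  have hgeq : (a :: t).length - 1 - g = min r2 r1 := by
    have h := hrevhead
    rw [pv_findIdxs_reverse, List.head?_map, List.head?_reverse, hg] at h
    simpa using h
  obtain ⟨k0, Kt, hc⟩ : ∃ k0 Kt, List.findIdxs p (a :: t) = k0 :: Kt := by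
    cases hcc : List.findIdxs p (a :: t) with
    | nil => exact absurd hcc hKne
    | cons k0 Kt => exact ⟨k0, Kt, rfl⟩
  rw [hc] at hhead hg
  have hk0 : k0 = min i2 i1 := by simpa using hhead
  have hgl : (k0 :: Kt).getLast (by simp) = g := by
    have h2 := List.getLast?_eq_some_getLast (l := k0 :: Kt) (by simp)
    rw [h2] at hg
    simpa using hg
  -- reduce port A
  rw [smallest_subarray_size]
  rw [show PySem.List.pyGetD (a :: t) 0 0 = a from PySem.List.pyGetD_zero_cons _ _ _]
  rw [PySem.List.foldl_pyRange_zero_pyGetD (a :: t) 0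
    (fun s x =>
      let s1 := if x > s.1 then (x, s.2) else s
      if x < s1.2 then (s1.1, x) else s1) (a, a)]
  rw [PySem.List.foldl_congr_mem (a :: t) _ (fun s x => (max s.1 x, min s.2 x)) (a, a)
    (by
      intro s x _
      by_cases h1 : s.1 < x <;> by_cases h2 : x < s.2 <;>
        simp [h1, h2, Prod.ext_iff] <;> omega)]
  rw [PySem.List.foldl_prod_mk max min (a :: t) a a]
  rw [show ((a :: t).foldl max a, (a :: t).foldl min a) = (mx, mn) from by
    rw [List.foldl_cons, List.foldl_cons, max_self, min_self, ← hmx, ← hmn]]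
  dsimp only
  rw [PySem.List.foldl_append_ite_eq_filter]
  rw [show PySem.List.len (a :: t) = (((a :: t).length : Nat) : Int) from PySem.List.len_eq _,
      PySem.List.pyRange_zero_nat, List.filter_map]
  rw [show ((fun i => decide (PySem.List.pyGetD (a :: t) i 0 = mx ∨ PySem.List.pyGetD (a :: t) i 0 = mn)) ∘
      (fun k : Nat => (k : Int))) = fun k : Nat => p ((a :: t).getD k 0) from by
    funext k
    simp [Function.comp, hp]]
  rw [pv_filter_range_eq_findIdxs (a :: t) 0 p, hc]
  simp only [List.nil_append, List.map_cons]
  rw [show ((k0 : Int) :: Kt.map (fun k : Nat => (k : Int))) =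
      (k0 :: Kt).map (fun k : Nat => (k : Int)) from rfl]
  rw [PySem.List.pyGetD_neg_one _ _ (by simp), List.getLast_map, hgl]
  rw [show PySem.List.pyGetD ((k0 :: Kt).map (fun k : Nat => (k : Int))) 0 0 = (k0 : Int) from
    PySem.List.pyGetD_zero_cons _ _ _]
  -- reduce port B
  rw [smallest_subarray_size_alt]
  rw [show PySem.List.pyGetD (a :: t) 0 0 = a from PySem.List.pyGetD_zero_cons _ _ _]
  rw [PySem.List.foldl_prod_mk pvMinStep pvMaxStep]
  rw [pv_minfold_char a t, pv_maxfold_char a t]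
  rw [← hmn, ← hmx] at *
  rw [hi1, hi2, hr1, hr2]
  simp only [Option.getD_some]
  omega

-- ===== VERDICT (by name: the statement is the Claim_ definition above) =====
theorem smallest_subarray_size_spec : Claim_equal_smallest_subarray_size := by
  intro A _ hne
  cases A with
  | nil => exact absurd rfl hne
  | cons a t =>
    unfold Spec_smallest_subarray_size
    exact pv_main a t
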